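-- pv_equiv track=rewrite | github.com/Profluent-Internships/MMDiff | src/data/components/pdb/data_utils.py | chain_int_to_str
-- ===== SOURCE A (Python) =====
-- import string
--
-- ALPHANUMERIC = string.ascii_letters + string.digits + " "
--
-- INT_TO_CHAIN = {i: chain_char for i, chain_char in enumerate(ALPHANUMERIC)}
--
-- def chain_int_to_str(chain_int: int):
--     if chain_int < len(ALPHANUMERIC):
--         return INT_TO_CHAIN[chain_int]
--
--     chain_str = ""
--     while chain_int > 0:
--         remainder = chain_int % len(ALPHANUMERIC)
--         chain_str = INT_TO_CHAIN[remainder] + chain_str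
--         chain_int = chain_int // len(ALPHANUMERIC)
--     return chain_str
-- ===== SOURCE B (Python) =====
-- import string
--
-- ALPHANUMERIC = string.ascii_letters + string.digits + " "
--
-- def chain_int_to_str(chain_int: int):
--     base = len(ALPHANUMERIC)
--     if chain_int < base:
--         return ALPHANUMERIC[chain_int]
--     # find the highest power of the base not exceeding chain_int,
--     # then emit digits most-significant first
--     p = 1
--     while p * base <= chain_int:
--         p *= base
--     chain_str = ""
--     while p > 0:
--         chain_str += ALPHANUMERIC[(chain_int // p) % base]
--         p //= base
--     return chain_str
-- ===== Notes on version B (the rewrite author's own statement) =====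
-- stated objective: alternative
-- what changed: Replaces A's least-significant-first while-loop that prepends each digit to an accumulator with a two-phase algorithm: first find the highest power of 63 not exceeding the input, then emit digits most-significant-first by dividing by descending powers and appending, so the string is built front-to-back instead of back-to-front.
import Mathlib
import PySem

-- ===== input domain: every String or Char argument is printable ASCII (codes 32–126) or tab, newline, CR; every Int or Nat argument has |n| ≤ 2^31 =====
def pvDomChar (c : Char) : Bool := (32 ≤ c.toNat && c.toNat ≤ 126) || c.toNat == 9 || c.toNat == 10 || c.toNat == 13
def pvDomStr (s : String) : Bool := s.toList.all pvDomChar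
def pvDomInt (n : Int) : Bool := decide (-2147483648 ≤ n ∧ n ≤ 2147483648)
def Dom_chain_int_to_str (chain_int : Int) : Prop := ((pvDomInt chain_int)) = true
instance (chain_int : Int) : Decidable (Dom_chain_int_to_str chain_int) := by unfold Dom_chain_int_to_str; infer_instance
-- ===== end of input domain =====

-- B replaces A's least-significant-first prepend loop by a two-phase algorithm (find the
-- highest power of 63, then emit digits most-significant-first, appending) (objective: alternative).

-- module constant  ALPHANUMERIC = string.ascii_letters + string.digits + " "  (63 chars)
def ALPHANUMERIC : List Char :=
  "abcdefghijklmnopqrstuvwxyzABCDEFGHIJKLMNOPQRSTUVWXYZ0123456789 ".toList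

-- len(ALPHANUMERIC) = 63, the base both Pythons use
def lenALPHANUMERIC : Int := (ALPHANUMERIC.length : Int)

-- ===== PORT A =====
-- A's  INT_TO_CHAIN[i]  dict lookup (keys 0..62; under Pre_ every key A looks up exists,
-- so the default is never reached)
def pvIntToChain (i : Int) : String := String.ofList [ALPHANUMERIC.getD i.toNat ' ']

-- A's while-loop: chain_str accumulates digits prepended at the front
def chainLoopA (chain_int : Int) (chain_str : String) : String :=
  if 0 < chain_int then
    chainLoopA (PySem.Int.floordiv chain_int lenALPHANUMERIC)
      (pvIntToChain (PySem.Int.mod chain_int lenALPHANUMERIC) ++ chain_str)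
  else chain_str
termination_by chain_int.toNat
decreasing_by
  rename_i h
  have h63 : lenALPHANUMERIC = (63 : Int) := by decide
  simp only [h63] at *
  rw [PySem.Int.floordiv_eq_ediv_of_pos (by omega : (0:Int) < 63)]
  omega

def chain_int_to_str (chain_int : Int) : String :=
  if chain_int < lenALPHANUMERIC then pvIntToChain chain_int   -- 'if chain_int < len(ALPHANUMERIC): return INT_TO_CHAIN[chain_int]'
  else chainLoopA chain_int ""

-- ===== PORT B =====
-- B's  ALPHANUMERIC[i]  string indexing (Python wraparound for negatives; under
-- Pre_ the index is in range, so the default is never reached)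
def pvAlphaIdx (i : Int) : String :=
  String.ofList [(PySem.List.pyGet? ALPHANUMERIC i).getD ' ']

-- B's first loop:  while p * base <= chain_int: p *= base
-- (the '0 < p' conjunct is a totality guard only: B calls this with p = 1)
def powLoopB (chain_int : Int) (p : Int) : Int :=
  if 0 < p ∧ p * lenALPHANUMERIC ≤ chain_int then powLoopB chain_int (p * lenALPHANUMERIC)
  else p
termination_by (chain_int.toNat + 1) - p.toNat
decreasing_by
  rename_i h
  have h63 : lenALPHANUMERIC = (63 : Int) := by decide
  simp only [h63] at *
  omega

-- B's second loop:  while p > 0: chain_str += ALPHANUMERIC[(chain_int // p) % base]; p //= base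
def buildLoopB (chain_int : Int) (p : Int) (chain_str : String) : String :=
  if 0 < p then
    buildLoopB chain_int (PySem.Int.floordiv p lenALPHANUMERIC)
      (chain_str ++ pvAlphaIdx (PySem.Int.mod (PySem.Int.floordiv chain_int p) lenALPHANUMERIC))
  else chain_str
termination_by p.toNat
decreasing_by
  rename_i h
  have h63 : lenALPHANUMERIC = (63 : Int) := by decide
  simp only [h63] at *
  rw [PySem.Int.floordiv_eq_ediv_of_pos (by omega : (0:Int) < 63)]
  omega

def chain_int_to_str_alt (chain_int : Int) : String :=
  if chain_int < lenALPHANUMERIC then pvAlphaIdx chain_int   -- 'if chain_int < base: return ALPHANUMERIC[chain_int]'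
  else buildLoopB chain_int (powLoopB chain_int 1) ""

-- ===== PRECONDITION & SPEC =====
-- Pre_ excludes negative chain_int, on which A's dict lookup raises KeyError.
def Pre_chain_int_to_str (chain_int : Int) : Prop := 0 ≤ chain_int
instance (chain_int : Int) : Decidable (Pre_chain_int_to_str chain_int) := by
  unfold Pre_chain_int_to_str; infer_instance
def pvWitness_chain_int_to_str : Int := (130)

def Spec_chain_int_to_str (chain_int : Int) (out : String) : Prop := out = chain_int_to_str_alt chain_int
instance (chain_int : Int) (out : String) : Decidable (Spec_chain_int_to_str chain_int out) := by unfold Spec_chain_int_to_str; infer_instance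

-- ===== CLAIM (what is proved, stated in full; the proofs are below) =====
def Claim_equal_chain_int_to_str : Prop := ∀ (chain_int : Int), Dom_chain_int_to_str chain_int → Pre_chain_int_to_str chain_int → Spec_chain_int_to_str chain_int (chain_int_to_str chain_int)

-- ===== LEMMAS AND PROOFS =====

theorem lenALPHANUMERIC_eq : lenALPHANUMERIC = (63 : Int) := by decide

-- on an in-range index, A's dict lookup and B's string indexing pick the same character
theorem lookup_eq (i : Int) (h0 : 0 ≤ i) (h : i < 63) : pvIntToChain i = pvAlphaIdx i := by
  interval_cases i <;> decide

-- accumulator-free form of B's second loop (proof helper, not a port)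
def buildPureB (n : Int) (p : Int) : String :=
  if 0 < p then pvAlphaIdx ((n / p) % 63) ++ buildPureB n (p / 63) else ""
termination_by p.toNat
decreasing_by omega

-- B's second loop appends its digits after the accumulator
theorem buildLoopB_acc : ∀ (k : Nat) (p : Int), p.toNat = k → ∀ (n : Int) (s : String),
    buildLoopB n p s = s ++ buildPureB n p := by
  intro k
  induction k using Nat.strong_induction_on with
  | _ k ih =>
    intro p hk n s
    rw [buildLoopB, buildPureB]
    by_cases hp : 0 < p
    · rw [if_pos hp, if_pos hp, lenALPHANUMERIC_eq,
          PySem.Int.floordiv_eq_ediv_of_pos (by omega : (0:Int) < 63),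
          PySem.Int.mod_eq_emod_of_pos (by omega : (0:Int) < 63),
          PySem.Int.floordiv_eq_ediv_of_pos hp]
      have hlt : (p / 63).toNat < k := by omega
      rw [ih _ hlt _ rfl, String.append_assoc]
    · rw [if_neg hp, if_neg hp, String.append_empty]

-- the characterisation of B's first loop: p = 63^i climbs to the top power 63^j
theorem powLoopB_eq : ∀ (m i j : Nat) (n : Int), j = i + m →
    (63:Int)^j ≤ n → n < (63:Int)^(j+1) → powLoopB n ((63:Int)^i) = (63:Int)^j := by
  intro m
  induction m with
  | zero =>
    intro i j n hj hle hlt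
    subst hj
    have hne : ¬(0 < (63:Int)^j ∧ (63:Int)^j * lenALPHANUMERIC ≤ n) := by
      rw [lenALPHANUMERIC_eq, ← pow_succ]
      simp only [not_and, not_le]
      intro _
      omega
    rw [powLoopB, if_neg hne]
  | succ m ih =>
    intro i j n hj hle hlt
    have hij : i < j := by omega
    have hpos : (0:Int) < 63^i := pow_pos (by norm_num) i
    rw [powLoopB, if_pos, lenALPHANUMERIC_eq, ← pow_succ]
    · exact ih (i+1) j n (by omega) hle hlt
    · refine ⟨hpos, ?_⟩
      rw [lenALPHANUMERIC_eq, ← pow_succ]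
      calc (63:Int)^(i+1) ≤ 63^j := pow_le_pow_right₀ (by norm_num) (by omega)
        _ ≤ n := hle

-- buildPureB at the lowest power is the last digit
theorem buildPureB_one (n : Int) : buildPureB n 1 = pvAlphaIdx (n % 63) := by
  rw [buildPureB, if_pos (by norm_num : (0:Int) < 1)]
  have h0 : ((1:Int) / 63) = 0 := by norm_num
  rw [Int.ediv_one, h0, buildPureB, if_neg (by norm_num : ¬ (0:Int) < 0),
      String.append_empty]

-- the digit-shift recurrence of buildPureB
theorem buildPureB_succ : ∀ (k : Nat) (n : Int), 0 ≤ n →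
    buildPureB n ((63:Int)^(k+1)) = buildPureB (n / 63) ((63:Int)^k) ++ pvAlphaIdx (n % 63) := by
  intro k
  induction k with
  | zero =>
    intro n hn
    rw [pow_one, pow_zero, buildPureB, if_pos (by norm_num : (0:Int) < 63)]
    have h1 : ((63:Int) / 63) = 1 := by norm_num
    rw [h1, buildPureB_one, buildPureB_one]
  | succ k ih =>
    intro n hn
    have hih := ih n hn
    have hdiv2 : ((63:Int)^(k+2) / 63) = 63^(k+1) := by
      rw [pow_succ]; exact Int.mul_ediv_cancel _ (by norm_num)
    have hdiv1 : ((63:Int)^(k+1) / 63) = 63^k := by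
      rw [pow_succ]; exact Int.mul_ediv_cancel _ (by norm_num)
    have hshift : n / (63:Int)^(k+2) = (n / 63) / (63:Int)^(k+1) := by
      rw [Int.ediv_ediv_of_nonneg, ← pow_succ']
      norm_num
    conv_lhs => rw [buildPureB]
    rw [if_pos (pow_pos (by norm_num) (k+2)), hdiv2, hih, hshift]
    conv_rhs => rw [buildPureB]
    rw [if_pos (pow_pos (by norm_num) (k+1)), hdiv1, String.append_assoc]

-- every positive n sits between consecutive powers of 63
theorem exists_top_pow (n : Int) (hn : 1 ≤ n) :
    ∃ j : Nat, (63:Int)^j ≤ n ∧ n < (63:Int)^(j+1) := by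
  refine ⟨Nat.log 63 n.toNat, ?_, ?_⟩
  · have h := Nat.pow_log_le_self 63 (show n.toNat ≠ 0 by omega)
    have h' : ((63:Nat)^Nat.log 63 n.toNat : Int) ≤ (n.toNat : Int) := by exact_mod_cast h
    push_cast at h' ⊢
    omega
  · have h := Nat.lt_pow_succ_log_self (by norm_num : 1 < 63) n.toNat
    have h' : ((n.toNat : Int)) < ((63:Nat)^(Nat.log 63 n.toNat + 1) : Int) := by exact_mod_cast h
    push_cast at h' ⊢
    omega

-- A's prepend loop computes B's most-significant-first digit string, followed by acc
theorem chainLoopA_eq_build : ∀ (k : Nat) (n : Int), n.toNat = k → 1 ≤ n → ∀ (acc : String),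
    chainLoopA n acc = buildPureB n (powLoopB n 1) ++ acc := by
  intro k
  induction k using Nat.strong_induction_on with
  | _ k ih =>
    intro n hk hn acc
    obtain ⟨j, hle, hlt⟩ := exists_top_pow n hn
    have hpow : powLoopB n 1 = (63:Int)^j := by
      have := powLoopB_eq j 0 j n (by omega) hle hlt
      simpa using this
    rw [chainLoopA, if_pos (by omega), lenALPHANUMERIC_eq,
        PySem.Int.floordiv_eq_ediv_of_pos (by omega : (0:Int) < 63),
        PySem.Int.mod_eq_emod_of_pos (by omega : (0:Int) < 63), hpow]
    by_cases hlt63 : n < 63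
    · have hj : j = 0 := by
        by_contra hj
        have : (63:Int)^1 ≤ 63^j := pow_le_pow_right₀ (by norm_num) (by omega)
        simp at this; omega
      subst hj
      have hq : n / 63 = 0 := by omega
      have hr : n % 63 = n := by omega
      rw [hq, hr, chainLoopA, if_neg (by omega), pow_zero, buildPureB_one, hr,
          lookup_eq n (by omega) (by omega)]
    · have hj1 : 1 ≤ j := by
        by_contra hj
        have hj0 : j = 0 := by omega
        subst hj0; simp at hlt; omega
      obtain ⟨j', rfl⟩ : ∃ j', j = j' + 1 := ⟨j - 1, by omega⟩
      rw [buildPureB_succ j' n (by omega)]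
      have hq1 : 1 ≤ n / 63 := by omega
      have hqk : (n / 63).toNat < k := by omega
      rw [ih _ hqk _ rfl hq1]
      have hpow' : powLoopB (n / 63) 1 = (63:Int)^j' := by
        have hle' : (63:Int)^j' ≤ n / 63 := by
          rw [Int.le_ediv_iff_mul_le (by norm_num : (0:Int) < 63), ← pow_succ]; exact hle
        have hlt' : n / 63 < (63:Int)^(j'+1) := by
          rw [Int.ediv_lt_iff_lt_mul (by norm_num : (0:Int) < 63), ← pow_succ]; exact hlt
        have := powLoopB_eq j' 0 j' (n / 63) (by omega) hle' hlt'
        simpa using this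
      rw [hpow', lookup_eq (n % 63) (by omega) (by omega), String.append_assoc]

-- ===== VERDICT (by name: the statement is the Claim_ definition above) =====
theorem chain_int_to_str_spec : Claim_equal_chain_int_to_str := by
  intro n _ hpre
  unfold Spec_chain_int_to_str Pre_chain_int_to_str at *
  by_cases hlt : n < 63
  · rw [chain_int_to_str, chain_int_to_str_alt, lenALPHANUMERIC_eq,
        if_pos hlt, if_pos hlt, lookup_eq n hpre hlt]
  · rw [chain_int_to_str, chain_int_to_str_alt, lenALPHANUMERIC_eq, if_neg hlt, if_neg hlt,
        chainLoopA_eq_build n.toNat n rfl (by omega), String.append_empty,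
        buildLoopB_acc (powLoopB n 1).toNat _ rfl, String.empty_append]
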